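-- pv_equiv track=rewrite | github.com/isyoudwn/algorithm | programers/week6/n^2 배열 자르기.py | solution
-- ===== SOURCE A (Python) =====
-- def solution(n, left, right):
--
--     # status는 n의 묶음을 계산하기 위함
--     status = 0
--     answer = []
--
--     # 10000000 이하로 해야하기 때문에 O(n)이하로 코드 작성
--     # O(n) 코드에서 시간초과가 발생하여 최적화 하였음
--
--     # n * n 배열을 잘라서 한줄로 만들었다고 가정하였음
--     # 그 상태에서 left ~ right 까지의 값을 구해서 answer에 append 하여 반환 할 예정
--     # n개 단위로 1차원 배열을 잘라서 묶음을 구하면 -> x번째 묶음은, 묶음 안에서의 인덱스 0 ~ x까지 (x + 1)로 해당 묶음이 채워진다.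
--     # ex) 0번째 묶음 : [1, 2, 3, 4] 1번째 묶음 : [2, 2, 3, 4]
--     # 나머지 배열은 (묶음에서의 인덱스 + 1)이 채워진다.
--     for i in range(left, right + 1) :
--
--         # index는, 현재 탐색 중인 i가 . . 묶음 안에서의 인덱스를 계산
--         index = i % n
--         # status는 현재의 묶음을 계산한다.
--         status = i//n
--
--         # 묶음 안에서의 0 ~ 묶음번 째 까지 (묶음 번 째 + 1)이 반복되어서 나오는 것을 표현
--         if index >= 0 and index <= status :
--             answer.append(status + 1)
--         # 그 외의 것은 index + 1만큼 채워짐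
--         else :
--             answer.append(index + 1)
--
--     return answer
-- ===== SOURCE B (Python) =====
-- def solution(n, left, right):
--     # Row-block construction: locate the first and last grid rows once with
--     # divmod, then emit each row's needed column range as a unit, instead of
--     # computing div/mod for every flat output index.
--     r0, c0 = divmod(left, n)
--     r1, c1 = divmod(right, n)
--     answer = []
--     for r in range(r0, r1 + 1):
--         lo = c0 if r == r0 else 0
--         hi = c1 + 1 if r == r1 else n
--         answer += [max(r, c) + 1 for c in range(lo, hi)]
--     return answer
-- ===== Notes on version B (the rewrite author's own statement) =====
-- stated objective: alternative
-- what changed: A computes i//n and i%n separately for every flat output index in one loop over left..right; B locates the first and last grid rows once with divmod and emits each row's needed column range [max(r,c)+1 for c in range(lo,hi)] as a unit, trimming only the first and last row at left/right. Pre_ excludes n <= 0: the grid size is naturally positive, A raises ZeroDivisionError for n = 0, and for negative n A's floor-division values are grid-meaningless artefacts that B's row construction does not reproduce (B returns [] there).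
-- outside the precondition, e.g. on solution(-3, 0, 4): A returns [1, -1, 0, 1, -1], B returns []; on solution(-2, -5, -1): A returns [0, 3, 0, 2, 0], B returns []
import Mathlib
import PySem

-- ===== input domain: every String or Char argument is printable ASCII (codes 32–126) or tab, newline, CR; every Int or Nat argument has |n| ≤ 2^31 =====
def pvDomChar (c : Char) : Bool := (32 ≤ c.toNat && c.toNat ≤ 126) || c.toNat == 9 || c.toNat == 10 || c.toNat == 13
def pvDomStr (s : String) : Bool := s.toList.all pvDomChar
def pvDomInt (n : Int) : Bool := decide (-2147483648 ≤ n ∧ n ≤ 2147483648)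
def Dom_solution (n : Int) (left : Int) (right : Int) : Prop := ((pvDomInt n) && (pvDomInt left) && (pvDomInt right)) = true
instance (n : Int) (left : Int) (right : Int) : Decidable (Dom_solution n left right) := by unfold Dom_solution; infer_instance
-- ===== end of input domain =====

-- B replaces A's per-flat-index div/mod loop by building each grid row's value
-- list as a unit and concatenating the rows, trimming the first and last row.

-- ===== PORT A =====
def solution (n : Int) (left : Int) (right : Int) : List Int :=
  (PySem.List.pyRange left (right + 1) 1).foldl
    (fun answer i =>
      let index := PySem.Int.mod i n
      let status := PySem.Int.floordiv i n
      if 0 ≤ index ∧ index ≤ status then answer ++ [status + 1]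
      else answer ++ [index + 1])
    []

-- ===== PORT B =====
def solution_alt (n : Int) (left : Int) (right : Int) : List Int :=
  let r0 := PySem.Int.floordiv left n
  let c0 := PySem.Int.mod left n
  let r1 := PySem.Int.floordiv right n
  let c1 := PySem.Int.mod right n
  (PySem.List.pyRange r0 (r1 + 1) 1).foldl
    (fun answer r =>
      let lo := if r = r0 then c0 else 0
      let hi := if r = r1 then c1 + 1 else n
      answer ++ (PySem.List.pyRange lo hi 1).map (fun c => max r c + 1))
    []

-- ===== PRECONDITION & SPEC =====
-- Pre_ excludes n ≤ 0: the grid size is naturally positive; A raises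
-- ZeroDivisionError at n = 0, and for negative n A's floor-division values are
-- grid-meaningless artefacts that B's row construction does not reproduce.
def Pre_solution (n : Int) (left : Int) (right : Int) : Prop := 0 < n
instance (n : Int) (left : Int) (right : Int) : Decidable (Pre_solution n left right) := by unfold Pre_solution; infer_instance
def pvWitness_solution : Int × Int × Int := (3, 2, 7)

def Spec_solution (n : Int) (left : Int) (right : Int) (out : List Int) : Prop := out = solution_alt n left right
instance (n : Int) (left : Int) (right : Int) (out : List Int) : Decidable (Spec_solution n left right out) := by unfold Spec_solution; infer_instance

-- ===== CLAIM (what is proved, stated in full; the proofs are below) =====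
def Claim_equal_solution : Prop := ∀ (n : Int) (left : Int) (right : Int), Dom_solution n left right → Pre_solution n left right → Spec_solution n left right (solution n left right)

-- ===== LEMMAS AND PROOFS =====

-- the per-index value A appends (proof-only definition)
def fval (n : Int) (i : Int) : Int :=
  if 0 ≤ PySem.Int.mod i n ∧ PySem.Int.mod i n ≤ PySem.Int.floordiv i n
  then PySem.Int.floordiv i n + 1 else PySem.Int.mod i n + 1

theorem solution_eq_map (n l r : Int) :
    solution n l r = (PySem.List.pyRange l (r + 1) 1).map (fval n) := by
  unfold solution
  suffices h : ∀ (xs : List Int) (acc : List Int),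
      xs.foldl (fun answer i =>
        let index := PySem.Int.mod i n
        let status := PySem.Int.floordiv i n
        if 0 ≤ index ∧ index ≤ status then answer ++ [status + 1]
        else answer ++ [index + 1]) acc = acc ++ xs.map (fval n) by
    simpa using h _ []
  intro xs
  induction xs with
  | nil => intro acc; simp
  | cons x xs ih =>
    intro acc
    simp only [List.foldl_cons, List.map_cons, ih, fval]
    split <;> simp

theorem fval_pos {n q : Int} (hn : 0 < n) {i : Int} (h1 : q * n ≤ i) (h2 : i < q * n + n) :
    fval n i = if i ≤ q * n + q then q + 1 else i - q * n + 1 := by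
  have hq : PySem.Int.floordiv i n = q := by
    rw [PySem.Int.floordiv_eq_iff_of_pos hn]
    constructor
    · exact h1
    · have : (q + 1) * n = q * n + n := by ring
      omega
  have hm : PySem.Int.mod i n = i - q * n := by
    have h := PySem.Int.floordiv_mul_add_mod i n
    rw [hq] at h
    omega
  rw [fval, hq, hm]
  generalize hqn : q * n = m at h1 h2 ⊢
  by_cases hc : i ≤ m + q
  · rw [if_pos (by omega), if_pos (by omega)]
  · rw [if_neg (by omega), if_neg (by omega)]

-- B's row r, columns lo..hi-1, is A's values over the matching flat index range
theorem row_eq_map {n : Int} (hn : 0 < n) (r lo hi : Int) (h0 : 0 ≤ lo) (h1 : hi ≤ n) :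
    (PySem.List.pyRange lo hi 1).map (fun c => max r c + 1)
      = (PySem.List.pyRange (r * n + lo) (r * n + hi) 1).map (fval n) := by
  rw [PySem.List.pyRange_one, PySem.List.pyRange_one, List.map_map, List.map_map]
  have e : r * n + hi - (r * n + lo) = hi - lo := by ring
  rw [e]
  apply List.map_congr_left
  intro k hk
  rw [List.mem_range] at hk
  have hkn : lo + (k : Int) < hi := by
    have : (k : Int) < (hi - lo).toNat := by exact_mod_cast hk
    omega
  simp only [Function.comp]
  have e2 : r * n + lo + (k : Int) = r * n + (lo + (k : Int)) := by ring
  rw [e2, fval_pos (q := r) hn (by omega) (by omega)]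
  omega

-- the tail rows s..r1 of B's loop (s past the first row r0)
theorem rows_eq {n : Int} (hn : 0 < n) (r0 c0 r1 c1 : Int) (hc1 : 0 ≤ c1) (hc1n : c1 < n) :
    ∀ (k : Nat) (s : Int), s + k = r1 → r0 < s →
      (PySem.List.pyRange s (r1 + 1) 1).flatMap
          (fun r => (PySem.List.pyRange (if r = r0 then c0 else 0)
              (if r = r1 then c1 + 1 else n) 1).map (fun c => max r c + 1))
        = (PySem.List.pyRange (s * n) (r1 * n + c1 + 1) 1).map (fval n) := by
  intro k
  induction k with
  | zero =>
    intro s hs hr0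
    have hs' : s = r1 := by omega
    subst hs'
    rw [PySem.List.pyRange_one_singleton, List.flatMap_cons, List.flatMap_nil, List.append_nil]
    rw [if_neg (by omega), if_pos rfl, row_eq_map hn s 0 (c1 + 1) (le_refl 0) (by omega)]
    congr 2 <;> omega
  | succ m ih =>
    intro s hs hr0
    have hsr : s < r1 := by push_cast at hs; omega
    rw [PySem.List.pyRange_one_cons (show s < r1 + 1 by omega), List.flatMap_cons]
    rw [ih (s + 1) (by push_cast at hs ⊢; omega) (by omega)]
    rw [if_neg (by omega), if_neg (by omega), row_eq_map hn s 0 n (le_refl 0) (le_refl n)]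
    have e2 : s * n + n = (s + 1) * n := by ring
    have e0 : s * n + 0 = s * n := by ring
    have hmul : (s + 1) * n ≤ r1 * n := mul_le_mul_of_nonneg_right (by omega) (by omega)
    rw [e2, e0, ← List.map_append,
      ← PySem.List.pyRange_one_append (s * n) ((s + 1) * n) (r1 * n + c1 + 1)
        (by nlinarith) (by omega)]

-- ===== VERDICT (by name: the statement is the Claim_ definition above) =====
theorem solution_spec : Claim_equal_solution := by
  intro n l r _hdom hn'
  have hn : (0 : Int) < n := hn'
  unfold Spec_solution
  rw [solution_eq_map]
  unfold solution_alt
  set r0 := PySem.Int.floordiv l n with hr0def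
  set c0 := PySem.Int.mod l n with hc0def
  set r1 := PySem.Int.floordiv r n with hr1def
  set c1 := PySem.Int.mod r n with hc1def
  have hl : r0 * n + c0 = l := by
    have := PySem.Int.floordiv_mul_add_mod l n; omega
  have hr : r1 * n + c1 = r := by
    have := PySem.Int.floordiv_mul_add_mod r n; omega
  have hc0 : 0 ≤ c0 := PySem.Int.mod_nonneg l hn
  have hc0n : c0 < n := PySem.Int.mod_lt l hn
  have hc1 : 0 ≤ c1 := PySem.Int.mod_nonneg r hn
  have hc1n : c1 < n := PySem.Int.mod_lt r hn
  rw [PySem.List.foldl_append_eq_flatMap, List.nil_append]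
  rcases lt_trichotomy r1 r0 with hc | hc | hc
  · -- no rows: left is past right
    have hmul : (r1 + 1) * n ≤ r0 * n := mul_le_mul_of_nonneg_right (by omega) (by omega)
    rw [PySem.List.pyRange_one_eq_nil (by omega : r1 + 1 ≤ r0), List.flatMap_nil,
      PySem.List.pyRange_one_eq_nil (by nlinarith), List.map_nil]
  · -- single row
    rw [hc] at hr ⊢
    rw [PySem.List.pyRange_one_singleton, List.flatMap_cons, List.flatMap_nil, List.append_nil]
    rw [if_pos rfl, if_pos rfl, row_eq_map hn r0 c0 (c1 + 1) hc0 (by omega)]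
    congr 2 <;> omega
  · -- several rows: first row trimmed at c0, then rows r0+1 .. r1
    rw [PySem.List.pyRange_one_cons (show r0 < r1 + 1 by omega), List.flatMap_cons]
    rw [if_pos rfl, if_neg (by omega), row_eq_map hn r0 c0 n hc0 (le_refl n)]
    rw [rows_eq hn r0 c0 r1 c1 hc1 hc1n (r1 - (r0 + 1)).toNat (r0 + 1) (by omega) (by omega)]
    have e2 : r0 * n + n = (r0 + 1) * n := by ring
    have hmul : (r0 + 1) * n ≤ r1 * n := mul_le_mul_of_nonneg_right (by omega) (by omega)
    rw [e2, ← List.map_append,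
      ← PySem.List.pyRange_one_append (r0 * n + c0) ((r0 + 1) * n) (r1 * n + c1 + 1)
        (by nlinarith) (by omega)]
    congr 2 <;> omega
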